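-- pv_equiv track=rewrite | github.com/JordanaBM/PlagiarismDetector | main.py | generate_following_tokens
-- ===== SOURCE A (Python) =====
-- def generate_following_tokens(string):
--     # Divide la cadena en palabras individuales
--     my_arr = string.split()
--     following_tokens = {}
--     # Para cada índice i en el rango de la longitud de la lista menos 1
--     for i in range(len(my_arr) - 1):
--         current_token = my_arr[i]
--         next_token = my_arr[i + 1]
--         # Si el token actual no está en el diccionario de tokens siguientes
--         if current_token not in following_tokens:
--             # Crea una lista vacía para almacenar los siguientes tokens
--             following_tokens[current_token] = []
--         # Agrega el siguiente token a la lista de tokens siguientes del token actual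
--         following_tokens[current_token].append(next_token)
--
--     return following_tokens
-- ===== SOURCE B (Python) =====
-- def generate_following_tokens(string):
--     tokens = string.split()
--     pairs = list(zip(tokens, tokens[1:]))
--     return {t: [b for a, b in pairs if a == t]
--             for t in dict.fromkeys(a for a, _ in pairs)}
-- ===== Notes on version B (the rewrite author's own statement) =====
-- stated objective: alternative
-- what changed: Replaces the index-driven loop with single-pass dict accumulation by a pairs-then-group pipeline: build the adjacent-token pairs with zip, take the distinct first components in encounter order via dict.fromkeys, and map each to the comprehension of its followers.
import Mathlib
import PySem

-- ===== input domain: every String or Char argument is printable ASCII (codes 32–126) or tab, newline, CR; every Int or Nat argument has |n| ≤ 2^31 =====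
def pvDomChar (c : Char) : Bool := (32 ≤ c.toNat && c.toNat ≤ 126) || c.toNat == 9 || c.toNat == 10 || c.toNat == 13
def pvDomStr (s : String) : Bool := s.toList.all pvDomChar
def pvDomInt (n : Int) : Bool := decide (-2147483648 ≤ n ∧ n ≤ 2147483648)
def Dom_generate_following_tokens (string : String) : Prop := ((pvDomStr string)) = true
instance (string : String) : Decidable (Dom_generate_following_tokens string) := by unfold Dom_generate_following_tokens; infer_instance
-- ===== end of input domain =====

-- B replaces A's single-pass dict accumulation with a zip-pairs / dedup-keys / per-key comprehension pipeline (alternative decomposition, not faster).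

-- ===== PORT A =====
-- A's loop body: if current not in dict, set dict[current] = []; then dict[current].append(next).
def generate_following_tokens (string : String) : List (String × List String) :=
  let my_arr := PySem.Str.split₀ string
  let d := (PySem.List.pyRange 0 (PySem.List.len my_arr - 1)).foldl
    (fun following_tokens i =>
      let current_token := PySem.List.pyGetD my_arr i ""      -- my_arr[i]; i is always in range
      let next_token := PySem.List.pyGetD my_arr (i + 1) ""   -- my_arr[i+1]; always in range
      let following_tokens :=
        if following_tokens.contains current_token then following_tokens
        else following_tokens.insert current_token []
      following_tokens.insert current_token
        (following_tokens.getD current_token [] ++ [next_token]))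
    PySem.Dict.empty
  d.items

-- ===== PORT B =====
def generate_following_tokens_alt (string : String) : List (String × List String) :=
  let tokens := PySem.Str.split₀ string
  let pairs := tokens.zip (PySem.List.slice tokens (some 1) none)
  (PySem.List.dedup (pairs.map (·.1))).map
    (fun t => (t, (pairs.filter (fun p => p.1 == t)).map (·.2)))

-- ===== PRECONDITION & SPEC =====
def Spec_generate_following_tokens (string : String) (out : List (String × List String)) : Prop := out = generate_following_tokens_alt string
instance (string : String) (out : List (String × List String)) : Decidable (Spec_generate_following_tokens string out) := by unfold Spec_generate_following_tokens; infer_instance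

-- ===== CLAIM (what is proved, stated in full; the proofs are below) =====
def Claim_equal_generate_following_tokens : Prop := ∀ (string : String), Dom_generate_following_tokens string → Spec_generate_following_tokens string (generate_following_tokens string)

-- ===== LEMMAS AND PROOFS =====

-- A's loop step (conditional empty-init then append) equals the canonical modify-append step.
theorem stepA_eq_modify (d : PySem.Dict String (List String)) (c n : String) :
    ((if d.contains c then d else d.insert c []).insert c
      ((if d.contains c then d else d.insert c []).getD c [] ++ [n]))
    = d.modify c [] (· ++ [n]) := by
  by_cases h : d.contains c
  · simp only [h, if_true, PySem.Dict.modify]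
  · simp only [Bool.not_eq_true] at h
    rw [if_neg (by simp [h]), PySem.Dict.getD_insert_self, PySem.Dict.insert_insert_self,
      PySem.Dict.modify, PySem.Dict.getD_of_not_contains d [] h, List.nil_append]

-- Pointwise: at an in-range index, A's step reads the i-th adjacent pair.
theorem stepA_elt (xs : List String) (acc : PySem.Dict String (List String)) (i : Int)
    (h0 : 0 ≤ i) (h1 : i < ((xs.zip xs.tail).length : Int)) :
    (let c := PySem.List.pyGetD xs i ""
     let n := PySem.List.pyGetD xs (i + 1) ""
     let d1 := if acc.contains c then acc else acc.insert c [];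
     d1.insert c (d1.getD c [] ++ [n]))
    = (acc.modify (PySem.List.pyGetD (xs.zip xs.tail) i ("", "")).1 []
        (· ++ [(PySem.List.pyGetD (xs.zip xs.tail) i ("", "")).2])) := by
  have hlen : (xs.zip xs.tail).length = xs.length - 1 := by
    simp [List.length_zip, List.length_tail]
  have hiN : i.toNat < (xs.zip xs.tail).length := by omega
  have hx : i.toNat < xs.length := by omega
  have hx1 : i.toNat + 1 < xs.length := by omega
  have ht : i.toNat < xs.tail.length := by rw [List.length_tail]; omega
  have hget : PySem.List.pyGetD (xs.zip xs.tail) i ("", "")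
      = (xs[i.toNat]'hx, xs.tail[i.toNat]'ht) := by
    rw [PySem.List.pyGetD_eq_getElem _ _ h0 (by omega)]
    exact List.getElem_zip
  have hc : PySem.List.pyGetD xs i "" = xs[i.toNat]'hx :=
    PySem.List.pyGetD_eq_getElem _ _ h0 (by omega)
  have hn : PySem.List.pyGetD xs (i + 1) "" = xs.tail[i.toNat]'ht := by
    rw [PySem.List.pyGetD_eq_getElem _ _ (by omega) (by omega)]
    rw [List.getElem_tail]
    have e : (i + 1).toNat = i.toNat + 1 := by omega
    simp only [e]
  dsimp only
  rw [hc, hn, stepA_eq_modify, hget]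

-- A's index fold over range(len-1) is the fold of the modify-append step over the adjacent pairs.
theorem foldA_eq_pairs (xs : List String) :
    (PySem.List.pyRange 0 (PySem.List.len xs - 1)).foldl
      (fun d i =>
        let c := PySem.List.pyGetD xs i ""
        let n := PySem.List.pyGetD xs (i + 1) ""
        let d1 := if d.contains c then d else d.insert c [];
        d1.insert c (d1.getD c [] ++ [n]))
      PySem.Dict.empty
    = (xs.zip xs.tail).foldl (fun d p => d.modify p.1 [] (· ++ [p.2])) PySem.Dict.empty := by
  have hlen : (xs.zip xs.tail).length = xs.length - 1 := by
    simp [List.length_zip, List.length_tail]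
  have hrange : PySem.List.pyRange 0 (PySem.List.len xs - 1)
      = PySem.List.pyRange 0 (PySem.List.len (xs.zip xs.tail)) := by
    cases xs with
    | nil => rfl
    | cons x t =>
      have e : PySem.List.len ((x :: t).zip (x :: t).tail) = PySem.List.len (x :: t) - 1 := by
        simp only [PySem.List.len, hlen]
        simp
      rw [e]
  rw [hrange]
  rw [PySem.List.foldl_congr_mem _ _
    (fun d i => (d.modify (PySem.List.pyGetD (xs.zip xs.tail) i ("", "")).1 []
        (· ++ [(PySem.List.pyGetD (xs.zip xs.tail) i ("", "")).2]))) _ ?_]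
  · exact PySem.List.foldl_pyRange_pyGetD (xs.zip xs.tail) ("", "")
      (fun d p => d.modify p.1 [] (· ++ [p.2])) PySem.Dict.empty le_rfl
  · intro acc i hi
    rw [PySem.List.mem_pyRange_one] at hi
    exact stepA_elt xs acc i hi.1 (by have := hi.2; rwa [PySem.List.len] at this)

-- ===== VERDICT (by name: the statement is the Claim_ definition above) =====
theorem generate_following_tokens_spec : Claim_equal_generate_following_tokens := by
  intro s _
  unfold Spec_generate_following_tokens generate_following_tokens generate_following_tokens_alt
  simp only [PySem.List.slice_from_one]
  rw [foldA_eq_pairs]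
  set pairs := (PySem.Str.split₀ s).zip (PySem.Str.split₀ s).tail with hpairs
  set D := pairs.foldl (fun d p => d.modify p.1 [] (· ++ [p.2])) PySem.Dict.empty with hD
  have hnd : D.keys.Nodup :=
    PySem.Dict.nodup_keys_foldl_modify_key pairs Prod.fst [] (fun d p => (· ++ [p.2]))
      PySem.Dict.empty PySem.Dict.nodup_keys_empty
  rw [PySem.Dict.items_eq_map_keys D hnd []]
  have hkeys : D.keys = PySem.List.dedup (pairs.map (·.1)) := by
    rw [hD, PySem.Dict.keys_foldl_modify_key pairs Prod.fst [] (fun d p => (· ++ [p.2])),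
      PySem.Dict.keys_empty, PySem.Set.update_nil_left, PySem.List.dedup_eq_ofList]
  rw [hkeys]
  apply List.map_congr_left
  intro k hk
  congr 1
  rw [hD, PySem.Dict.getD_foldl_modify_append pairs PySem.Dict.empty k,
    PySem.Dict.getD_empty, List.nil_append]
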